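-- pv_equiv track=rewrite | github.com/pepijnweitzel/Portfolio | CS50p/plates/plates.py | no_letters_after_numbers
-- ===== SOURCE A (Python) =====
-- def no_letters_after_numbers(s):
--     # Create function that checks if there is a number in plate no letters come after it
--     numbers_in_plate = "no"
--     for i in range(len(s)):
--         if s[i].isnumeric():
--             number_index = i
--             numbers_in_plate = "yes"
--             if s[i] == "0":
--                 return False
--             break
--     if numbers_in_plate == "yes":
--         for i in range(number_index + 1, len(s)):
--             if s[i].isalpha():
--                 return False
--     return True
-- ===== SOURCE B (Python) =====
-- def no_letters_after_numbers(s):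
--     # Index-based: collect positions with enumerate-comprehensions and compare
--     # the last letter position with the first digit position, no stateful scan.
--     digit_hits = [(i, c) for i, c in enumerate(s) if c.isnumeric()]
--     if not digit_hits:
--         return True
--     first, d = digit_hits[0]
--     if d == "0":
--         return False
--     letter_positions = [i for i, c in enumerate(s) if c.isalpha()]
--     return not letter_positions or letter_positions[-1] < first
-- ===== Notes on version B (the rewrite author's own statement) =====
-- stated objective: alternative
-- what changed: Instead of A's staged scans (find the first digit, then walk the remainder rejecting letters), B builds the lists of digit and letter positions with enumerate-comprehensions and decides by comparing the last letter position with the first digit position.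
import Mathlib
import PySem

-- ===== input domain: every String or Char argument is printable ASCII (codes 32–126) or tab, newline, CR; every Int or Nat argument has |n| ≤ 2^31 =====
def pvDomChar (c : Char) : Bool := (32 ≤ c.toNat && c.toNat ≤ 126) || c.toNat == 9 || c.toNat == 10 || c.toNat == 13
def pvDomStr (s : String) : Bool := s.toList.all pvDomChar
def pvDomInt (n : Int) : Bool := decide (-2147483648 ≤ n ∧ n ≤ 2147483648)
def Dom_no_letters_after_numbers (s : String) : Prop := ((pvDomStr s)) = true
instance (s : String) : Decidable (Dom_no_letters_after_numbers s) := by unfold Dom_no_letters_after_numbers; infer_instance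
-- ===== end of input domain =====

-- B decides by comparing the last letter position with the first digit position
-- (position lists built by comprehensions) instead of A's staged scans; alternative, same cost.

-- ===== PORT A =====
-- A's second loop over s[number_index+1:]: return False on the first alphabetic char.
def pvA_scan : List Char → Bool
  | [] => true
  | c :: rest => if PySem.Chars.isalpha c then false else pvA_scan rest

-- A's first loop: find the first numeric char (Chars.isdigit is exact for
-- .isnumeric on the printable-ASCII domain); '0' → False, else scan the rest.
def pvA_find : List Char → Bool
  | [] => true
  | c :: rest =>
      if PySem.Chars.isdigit c then
        (if c == '0' then false else pvA_scan rest)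
      else pvA_find rest

def no_letters_after_numbers (s : String) : Bool := pvA_find s.toList

-- ===== PORT B =====
-- [(i, c) for i, c in enumerate(s) if c.isnumeric()] (k = current enumerate index)
def pvB_digits : List Char → Nat → List (Nat × Char)
  | [], _ => []
  | c :: rest, k =>
      if PySem.Chars.isdigit c then (k, c) :: pvB_digits rest (k + 1)
      else pvB_digits rest (k + 1)

-- [i for i, c in enumerate(s) if c.isalpha()]
def pvB_letters : List Char → Nat → List Nat
  | [], _ => []
  | c :: rest, k =>
      if PySem.Chars.isalpha c then k :: pvB_letters rest (k + 1)
      else pvB_letters rest (k + 1)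

def no_letters_after_numbers_alt (s : String) : Bool :=
  match pvB_digits s.toList 0 with
  | [] => true
  | (first, d) :: _ =>
      if d == '0' then false
      else
        match (pvB_letters s.toList 0).getLast? with
        | none => true
        | some j => decide (j < first)

-- ===== PRECONDITION & SPEC =====
def Spec_no_letters_after_numbers (s : String) (out : Bool) : Prop := out = no_letters_after_numbers_alt s
instance (s : String) (out : Bool) : Decidable (Spec_no_letters_after_numbers s out) := by unfold Spec_no_letters_after_numbers; infer_instance

-- ===== CLAIM (what is proved, stated in full; the proofs are below) =====
def Claim_equal_no_letters_after_numbers : Prop := ∀ (s : String), Dom_no_letters_after_numbers s → Spec_no_letters_after_numbers s (no_letters_after_numbers s)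

-- ===== LEMMAS AND PROOFS =====
-- B's decision body, parametrised by the enumerate offset k.
def pvB_body (l : List Char) (k : Nat) : Bool :=
  match pvB_digits l k with
  | [] => true
  | (first, d) :: _ =>
      if d == '0' then false
      else
        match (pvB_letters l k).getLast? with
        | none => true
        | some j => decide (j < first)

theorem pvDigit_not_alpha (c : Char) (h : PySem.Chars.isdigit c = true) :
    PySem.Chars.isalpha c = false := by
  simp only [PySem.Chars.isdigit, PySem.Chars.isalpha, PySem.Chars.isupper, PySem.Chars.islower,
    decide_eq_true_eq, Bool.or_eq_false_iff, Bool.and_eq_true, Char.le_def,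
    UInt32.le_iff_toNat_le, Bool.and_eq_false_iff, decide_eq_false_iff_not, not_le,
    show ('0').val.toNat = 48 from rfl, show ('9').val.toNat = 57 from rfl,
    show ('A').val.toNat = 65 from rfl, show ('Z').val.toNat = 90 from rfl,
    show ('a').val.toNat = 97 from rfl, show ('z').val.toNat = 122 from rfl] at *
  omega

theorem pvGetLast?_cons {α : Type} (a : α) (l : List α) (h : l ≠ []) :
    (a :: l).getLast? = l.getLast? := by
  cases l with
  | nil => exact absurd rfl h
  | cons b t => simp [List.getLast?_cons_cons]

theorem pvLetters_ge (l : List Char) (k j : Nat) (h : j ∈ pvB_letters l k) : k ≤ j := by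
  induction l generalizing k with
  | nil => simp [pvB_letters] at h
  | cons c rest ih =>
      simp only [pvB_letters] at h
      split at h
      · rcases List.mem_cons.mp h with h | h
        · omega
        · have := ih (k + 1) h; omega
      · have := ih (k + 1) h; omega

theorem pvDigits_ge (l : List Char) (k : Nat) (p : Nat × Char)
    (h : p ∈ pvB_digits l k) : k ≤ p.1 := by
  induction l generalizing k with
  | nil => simp [pvB_digits] at h
  | cons c rest ih =>
      simp only [pvB_digits] at h
      split at h
      · rcases List.mem_cons.mp h with h | h
        · subst h; simp
        · have := ih (k + 1) h; omega
      · have := ih (k + 1) h; omega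

theorem pvScan_iff_letters_nil (l : List Char) (k : Nat) :
    pvA_scan l = true ↔ pvB_letters l k = [] := by
  induction l generalizing k with
  | nil => simp [pvA_scan, pvB_letters]
  | cons c rest ih =>
      simp only [pvA_scan, pvB_letters]
      split
      · simp
      · exact ih (k + 1)

theorem pvFind_eq_body (l : List Char) (k : Nat) : pvA_find l = pvB_body l k := by
  induction l generalizing k with
  | nil => rfl
  | cons c rest ih =>
      by_cases hd : PySem.Chars.isdigit c = true
      · simp only [pvA_find, pvB_body, pvB_digits, pvB_letters, hd, if_pos,
          pvDigit_not_alpha c hd, if_neg, Bool.false_eq_true, not_false_iff]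
        by_cases h0 : c == '0'
        · simp [h0]
        · simp only [h0, if_neg, Bool.false_eq_true, not_false_iff]
          cases hL : (pvB_letters rest (k + 1)).getLast? with
          | none =>
              have : pvB_letters rest (k + 1) = [] := List.getLast?_eq_none_iff.mp hL
              simp [(pvScan_iff_letters_nil rest (k + 1)).mpr this]
          | some j =>
              have hjmem : j ∈ pvB_letters rest (k + 1) := List.mem_of_getLast? hL
              have hne : pvB_letters rest (k + 1) ≠ [] := by
                intro h; rw [h] at hjmem; simp at hjmem
              have hscan : pvA_scan rest = false := by
                cases hs : pvA_scan rest
                · rfl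
                · exact absurd ((pvScan_iff_letters_nil rest (k + 1)).mp hs) hne
              have hj : k + 1 ≤ j := pvLetters_ge rest (k + 1) j hjmem
              simp [hscan]
              omega
      · have hdf : PySem.Chars.isdigit c = false := by simpa using hd
        simp only [pvA_find, pvB_body, pvB_digits, pvB_letters, hdf,
          Bool.false_eq_true, if_neg, not_false_iff]
        rw [ih (k + 1)]
        unfold pvB_body
        cases hD : pvB_digits rest (k + 1) with
        | nil => cases hA : PySem.Chars.isalpha c <;> simp
        | cons p ds =>
            obtain ⟨first, d⟩ := p
            have hfirst : k + 1 ≤ first := by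
              have := pvDigits_ge rest (k + 1) (first, d) (by rw [hD]; simp)
              simpa using this
            by_cases h0 : d == '0'
            · cases hA : PySem.Chars.isalpha c <;> simp [h0]
            · cases hA : PySem.Chars.isalpha c
              · simp [h0]
              · simp only [h0, if_neg, Bool.false_eq_true, not_false_iff, if_true]
                cases hL : (pvB_letters rest (k + 1)).getLast? with
                | none =>
                    have : pvB_letters rest (k + 1) = [] := List.getLast?_eq_none_iff.mp hL
                    simp [this]
                    omega
                | some j =>
                    have hne : pvB_letters rest (k + 1) ≠ [] := by
                      intro h; rw [h] at hL; simp at hL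
                    rw [pvGetLast?_cons _ _ hne, hL]

-- ===== VERDICT (by name: the statement is the Claim_ definition above) =====
theorem no_letters_after_numbers_spec : Claim_equal_no_letters_after_numbers := by
  intro s _
  unfold Spec_no_letters_after_numbers no_letters_after_numbers no_letters_after_numbers_alt
  have h := pvFind_eq_body s.toList 0
  unfold pvB_body at h
  exact h
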